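-- pv_equiv track=rewrite | github.com/incepnizer/Sentinel-AI | sentinel_graph_generator.py | get_sentiment_values
-- ===== SOURCE A (Python) =====
-- def get_sentiment_values(result):
--
--     neg_counter = 0
--     neu_counter = 0
--     pos_counter = 0
--
--
--     for r in result:
--         if r[2] > 3:
--             pos_counter = pos_counter + 1
--
--         elif r[2] < 3:
--             neg_counter = neg_counter + 1
--
--         else:
--             neu_counter = neu_counter + 1
--
--     senti_values = [neg_counter, neu_counter, pos_counter]
--     return senti_values
-- ===== SOURCE B (Python) =====
-- def get_sentiment_values(result):
--     neg = sum(1 for r in result if r[2] < 3)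
--     neu = sum(1 for r in result if r[2] == 3)
--     pos = sum(1 for r in result if r[2] > 3)
--     return [neg, neu, pos]
-- ===== Notes on version B (the rewrite author's own statement) =====
-- stated objective: alternative
-- what changed: Replaced the single loop carrying three mutable counters with three independent one-predicate scans (sum of a filtered generator per category).
import Mathlib
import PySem

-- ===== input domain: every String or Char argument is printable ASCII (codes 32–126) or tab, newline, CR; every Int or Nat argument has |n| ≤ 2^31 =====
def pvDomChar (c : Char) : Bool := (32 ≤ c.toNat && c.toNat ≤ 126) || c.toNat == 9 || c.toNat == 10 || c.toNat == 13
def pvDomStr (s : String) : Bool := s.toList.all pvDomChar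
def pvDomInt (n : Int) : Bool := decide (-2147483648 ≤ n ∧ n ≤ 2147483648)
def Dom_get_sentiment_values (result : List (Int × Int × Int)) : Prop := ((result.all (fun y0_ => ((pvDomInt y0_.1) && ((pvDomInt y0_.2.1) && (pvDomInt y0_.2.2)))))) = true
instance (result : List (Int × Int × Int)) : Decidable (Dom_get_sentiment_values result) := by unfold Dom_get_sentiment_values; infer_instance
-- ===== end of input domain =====

-- B replaces A's single three-branch counting loop with three independent filtered scans; objective: alternative decomposition.

-- ===== PORT A =====
-- A's single loop over result, carrying the three counters (neg, neu, pos) as the fold state,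
-- with branches in A's order: r[2] > 3, elif r[2] < 3, else.
def get_sentiment_values (result : List (Int × Int × Int)) : List Int :=
  let st := result.foldl (fun (acc : Int × Int × Int) (r : Int × Int × Int) =>
    let (neg, neu, pos) := acc
    if r.2.2 > 3 then (neg, neu, pos + 1)
    else if r.2.2 < 3 then (neg + 1, neu, pos)
    else (neg, neu + 1, pos)) (0, 0, 0)
  [st.1, st.2.1, st.2.2]

-- ===== PORT B =====
-- B: three independent passes, one predicate each (sum(1 for r in result if …) = countP).
def get_sentiment_values_alt (result : List (Int × Int × Int)) : List Int :=
  let neg : Int := (result.countP (fun (r : Int × Int × Int) => r.2.2 < 3) : Nat)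
  let neu : Int := (result.countP (fun (r : Int × Int × Int) => r.2.2 == 3) : Nat)
  let pos : Int := (result.countP (fun (r : Int × Int × Int) => r.2.2 > 3) : Nat)
  [neg, neu, pos]

-- ===== PRECONDITION & SPEC =====
def Spec_get_sentiment_values (result : List (Int × Int × Int)) (out : List Int) : Prop := out = get_sentiment_values_alt result
instance (result : List (Int × Int × Int)) (out : List Int) : Decidable (Spec_get_sentiment_values result out) := by unfold Spec_get_sentiment_values; infer_instance

-- ===== CLAIM (what is proved, stated in full; the proofs are below) =====
def Claim_equal_get_sentiment_values : Prop := ∀ (result : List (Int × Int × Int)), Dom_get_sentiment_values result → Spec_get_sentiment_values result (get_sentiment_values result)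

-- ===== LEMMAS AND PROOFS =====

-- Loop invariant: A's fold starting from (a, b, c) adds B's three counts componentwise.
lemma fold_counts (result : List (Int × Int × Int)) (a b c : Int) :
    result.foldl (fun (acc : Int × Int × Int) (r : Int × Int × Int) =>
      let (neg, neu, pos) := acc
      if r.2.2 > 3 then (neg, neu, pos + 1)
      else if r.2.2 < 3 then (neg + 1, neu, pos)
      else (neg, neu + 1, pos)) (a, b, c)
    = (a + (result.countP (fun (r : Int × Int × Int) => r.2.2 < 3) : Nat),
       b + (result.countP (fun (r : Int × Int × Int) => r.2.2 == 3) : Nat),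
       c + (result.countP (fun (r : Int × Int × Int) => r.2.2 > 3) : Nat)) := by
  induction result generalizing a b c with
  | nil => simp
  | cons r t ih =>
    simp only [List.foldl_cons, List.countP_cons]
    by_cases h1 : r.2.2 > 3
    · have h2 : ¬ r.2.2 < 3 := by omega
      have h3 : ¬ (r.2.2 == 3) = true := by simp; omega
      rw [if_pos h1, ih]
      simp [h1, h2, h3]
      omega
    · by_cases h2 : r.2.2 < 3
      · have h3 : ¬ (r.2.2 == 3) = true := by simp; omega
        rw [if_neg h1, if_pos h2, ih]
        simp [h1, h2, h3]
        omega
      · have h3 : (r.2.2 == 3) = true := by simp; omega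
        rw [if_neg h1, if_neg h2, ih]
        simp [h1, h2, h3]
        omega

-- ===== VERDICT (by name: the statement is the Claim_ definition above) =====
theorem get_sentiment_values_spec : Claim_equal_get_sentiment_values := by
  intro result _
  unfold Spec_get_sentiment_values get_sentiment_values get_sentiment_values_alt
  simp only [fold_counts]
  simp
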